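-- pv_equiv track=rewrite | github.com/a-price/coterie | coterie/scripts/ellipsoids.py | diag_indices
-- ===== SOURCE A (Python) =====
-- def diag_indices(dim):
--     indices = []
--
--     counter = 0
--     for i in range(dim):
--         for j in range(i + 1):
--             if i == j:
--                 indices.append(counter)
--             counter += 1
--     return indices
-- ===== SOURCE B (Python) =====
-- def diag_indices(dim):
--     # closed form: the diagonal (i,i) sits at packed index i*(i+1)//2 + i
--     return [i * (i + 1) // 2 + i for i in range(dim)]
-- ===== Notes on version B (the rewrite author's own statement) =====
-- stated objective: faster
-- what changed: Replaced the nested counter loops by the closed-form packed-triangular index i*(i+1)//2 + i per row.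
import Mathlib
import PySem

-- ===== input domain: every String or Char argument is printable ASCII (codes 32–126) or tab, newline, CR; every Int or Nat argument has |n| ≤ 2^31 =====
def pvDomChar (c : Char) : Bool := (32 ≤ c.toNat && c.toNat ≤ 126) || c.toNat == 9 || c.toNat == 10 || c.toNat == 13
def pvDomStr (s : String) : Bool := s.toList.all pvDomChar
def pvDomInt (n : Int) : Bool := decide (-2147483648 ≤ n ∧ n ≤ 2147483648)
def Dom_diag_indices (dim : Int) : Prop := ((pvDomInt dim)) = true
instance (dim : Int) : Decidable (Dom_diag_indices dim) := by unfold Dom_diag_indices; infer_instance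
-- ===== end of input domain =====

-- B replaces A's nested counter loops by the closed-form packed index i*(i+1)//2 + i per row (O(dim) vs O(dim^2)).

-- ===== PORT A =====
-- inner loop body: for j in range(i+1): if i == j: indices.append(counter); counter += 1
def diagStep (i : Int) (st : List Int × Int) (j : Int) : List Int × Int :=
  ((if i == j then st.1 ++ [st.2] else st.1), st.2 + 1)

def diag_indices (dim : Int) : List Int :=
  ((PySem.List.pyRange 0 dim 1).foldl
    (fun (st : List Int × Int) i => (PySem.List.pyRange 0 (i + 1) 1).foldl (diagStep i) st)
    ([], 0)).1

-- ===== PORT B =====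
def diag_indices_alt (dim : Int) : List Int :=
  (PySem.List.pyRange 0 dim 1).map (fun i => PySem.Int.floordiv (i * (i + 1)) 2 + i)

-- ===== PRECONDITION & SPEC =====
def Spec_diag_indices (dim : Int) (out : List Int) : Prop := out = diag_indices_alt dim
instance (dim : Int) (out : List Int) : Decidable (Spec_diag_indices dim out) := by unfold Spec_diag_indices; infer_instance

-- ===== CLAIM (what is proved, stated in full; the proofs are below) =====
def Claim_equal_diag_indices : Prop := ∀ (dim : Int), Dom_diag_indices dim → Spec_diag_indices dim (diag_indices dim)

-- ===== LEMMAS AND PROOFS =====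

-- rows j < i never append; the counter just advances by the row length
theorem diag_inner_prefix (i : Int) (n : Nat) (h : (n : Int) ≤ i) (acc : List Int) (c : Int) :
    (PySem.List.pyRange 0 (n : Int) 1).foldl (diagStep i) (acc, c) = (acc, c + n) := by
  induction n generalizing c with
  | zero => simp [PySem.List.pyRange_one_eq_nil]
  | succ m ih =>
      have hsplit : PySem.List.pyRange 0 ((m : Int) + 1) 1
          = PySem.List.pyRange 0 (m : Int) 1 ++ [(m : Int)] :=
        PySem.List.pyRange_one_succ_right (by exact_mod_cast Nat.zero_le m)
      have hm : (m : Int) ≤ i := by push_cast at h ⊢; omega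
      have hne : (i == (m : Int)) = false := by
        simp only [beq_eq_false_iff_ne, ne_eq]
        push_cast at h; omega
      push_cast
      rw [hsplit, List.foldl_append, ih hm]
      simp [diagStep, hne]
      ring

-- a full row i = n: one append of the current counter, at value c + n
theorem diag_inner_full (n : Nat) (acc : List Int) (c : Int) :
    (PySem.List.pyRange 0 ((n : Int) + 1) 1).foldl (diagStep (n : Int)) (acc, c)
      = (acc ++ [c + n], c + n + 1) := by
  have hsplit : PySem.List.pyRange 0 ((n : Int) + 1) 1
      = PySem.List.pyRange 0 (n : Int) 1 ++ [(n : Int)] :=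
    PySem.List.pyRange_one_succ_right (by exact_mod_cast Nat.zero_le n)
  rw [hsplit, List.foldl_append, diag_inner_prefix (n : Int) n le_rfl]
  simp [diagStep]

-- outer invariant: after n rows the list is the closed forms and the counter is n*(n+1)/2
theorem diag_outer (n : Nat) :
    (PySem.List.pyRange 0 (n : Int) 1).foldl
      (fun (st : List Int × Int) i => (PySem.List.pyRange 0 (i + 1) 1).foldl (diagStep i) st)
      ([], 0)
    = ((List.range n).map (fun k => ((k * (k + 1) / 2 + k : Nat) : Int)),
       ((n * (n + 1) / 2 : Nat) : Int)) := by
  induction n with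
  | zero => simp [PySem.List.pyRange_one_eq_nil]
  | succ m ih =>
      have hsplit : PySem.List.pyRange 0 ((m : Int) + 1) 1
          = PySem.List.pyRange 0 (m : Int) 1 ++ [(m : Int)] :=
        PySem.List.pyRange_one_succ_right (by exact_mod_cast Nat.zero_le m)
      rw [show ((m + 1 : Nat) : Int) = (m : Int) + 1 from by push_cast; ring,
         hsplit, List.foldl_append, ih]
      simp only [List.foldl_cons, List.foldl_nil]
      rw [diag_inner_full]
      have hmul : (m + 1) * (m + 2) = m * (m + 1) + 2 * (m + 1) := by ring
      have key : (m + 1) * (m + 2) / 2 = m * (m + 1) / 2 + (m + 1) := by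
        rw [hmul, Nat.add_mul_div_left _ _ (by norm_num : 0 < 2)]
      simp only [Prod.mk.injEq]
      constructor
      · rw [List.range_succ, List.map_append]
        simp only [List.map_cons, List.map_nil]
        congr 1
      · rw [show (m + 1) * (m + 1 + 1) = (m + 1) * (m + 2) from rfl, key]
        push_cast
        ring

theorem diag_floordiv_nat (k : Nat) :
    PySem.Int.floordiv ((k : Int) * ((k : Int) + 1)) 2 + (k : Int)
      = ((k * (k + 1) / 2 + k : Nat) : Int) := by
  have h : (k : Int) * ((k : Int) + 1) = ((k * (k + 1) : Nat) : Int) := by push_cast; ring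
  rw [h, PySem.Int.floordiv_eq_ediv_of_pos (by norm_num : (0:Int) < 2)]
  generalize k * (k + 1) = a
  omega

theorem diag_eq_nat (n : Nat) : diag_indices (n : Int) = diag_indices_alt (n : Int) := by
  unfold diag_indices diag_indices_alt
  rw [diag_outer, PySem.List.pyRange_zero_natCast, List.map_map]
  apply List.map_congr_left
  intro k _
  exact (diag_floordiv_nat k).symm

-- ===== VERDICT (by name: the statement is the Claim_ definition above) =====
theorem diag_indices_spec : Claim_equal_diag_indices := by
  intro dim _
  unfold Spec_diag_indices
  rcases (show 0 ≤ dim ∨ dim < 0 by omega) with h | h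
  · obtain ⟨n, rfl⟩ : ∃ n : Nat, dim = (n : Int) := ⟨dim.toNat, (Int.toNat_of_nonneg h).symm⟩
    exact diag_eq_nat n
  · unfold diag_indices diag_indices_alt
    rw [PySem.List.pyRange_one_eq_nil (by omega)]
    simp
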